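-- pv_equiv track=rewrite | github.com/mrizwanakram/Character-Gusssing-Game-with-python | final-lingo (1).py | random_word
-- ===== SOURCE A (Python) =====
-- def random_word(dico,l): #  Updates displayed word containing correct indices
--     w = ""
--     for i in range(len(dico)):
--         if i in l:
--             w += dico[i]
--         else:
--             w += "-"
--     return w
-- ===== SOURCE B (Python) =====
-- def random_word(dico, l):
--     # Scatter-write: start fully masked, reveal each in-range index from l.
--     out = ["-"] * len(dico)
--     for idx in l:
--         if 0 <= idx < len(dico):
--             out[idx] = dico[idx]
--     return "".join(out)
-- ===== Notes on version B (the rewrite author's own statement) =====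
-- stated objective: alternative
-- what changed: Replaced the per-position scan with an 'i in l' membership test by a scatter-write: a '-'-filled char array over which the revealed indices in l are written directly, then joined.
import Mathlib
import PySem

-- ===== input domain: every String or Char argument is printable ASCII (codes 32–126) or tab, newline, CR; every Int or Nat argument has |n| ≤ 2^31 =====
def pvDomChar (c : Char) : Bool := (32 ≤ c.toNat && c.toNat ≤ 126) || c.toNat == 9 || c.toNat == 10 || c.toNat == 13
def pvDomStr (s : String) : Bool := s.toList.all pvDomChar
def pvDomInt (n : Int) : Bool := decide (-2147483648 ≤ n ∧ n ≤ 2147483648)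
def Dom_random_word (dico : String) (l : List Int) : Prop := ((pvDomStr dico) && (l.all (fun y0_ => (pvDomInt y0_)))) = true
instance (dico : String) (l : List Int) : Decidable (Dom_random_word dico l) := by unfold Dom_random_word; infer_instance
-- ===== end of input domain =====

-- B replaces A's per-position membership scan by a scatter-write over the revealed indices (alternative algorithm).

-- ===== PORT A =====
-- scan every position, appending dico[i] if i ∈ l else '-'
def random_word (dico : String) (l : List Int) : String :=
  String.mk ((List.range dico.toList.length).foldl
    (fun (w : List Char) (i : Nat) =>
      if (i : Int) ∈ l then w ++ [dico.toList.getD i ' '] else w ++ ['-'])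
    [])

-- ===== PORT B =====
-- '-'-filled array, write dico[idx] at each in-range idx in l
def random_word_alt (dico : String) (l : List Int) : String :=
  String.mk (l.foldl
    (fun (out : List Char) idx =>
      if 0 ≤ idx ∧ idx < (dico.toList.length : Int) then
        out.set idx.toNat (dico.toList.getD idx.toNat ' ')
      else out)
    (List.replicate dico.toList.length '-'))

-- ===== PRECONDITION & SPEC =====
def Spec_random_word (dico : String) (l : List Int) (out : String) : Prop := out = random_word_alt dico l
instance (dico : String) (l : List Int) (out : String) : Decidable (Spec_random_word dico l out) := by unfold Spec_random_word; infer_instance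

-- ===== CLAIM (what is proved, stated in full; the proofs are below) =====
def Claim_equal_random_word : Prop := ∀ (dico : String) (l : List Int), Dom_random_word dico l → Spec_random_word dico l (random_word dico l)

-- ===== LEMMAS AND PROOFS =====

-- A's append-fold is a map over the range
theorem pvA_foldl_map (p : Nat → Prop) [DecidablePred p] (f g : Nat → List Char)
    (xs : List Nat) (acc : List Char) :
    xs.foldl (fun w i => if p i then w ++ f i else w ++ g i) acc =
      acc ++ xs.flatMap (fun i => if p i then f i else g i) := by
  induction xs generalizing acc with
  | nil => simp
  | cons x xs ih =>
    simp only [List.foldl, List.flatMap_cons, ih]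
    split_ifs <;> simp

theorem pvB_step_length (s : List Char) (l : List Int) (out : List Char) :
    (l.foldl (fun (out : List Char) idx =>
      if 0 ≤ idx ∧ idx < (s.length : Int) then out.set idx.toNat (s.getD idx.toNat ' ') else out)
      out).length = out.length := by
  induction l generalizing out with
  | nil => rfl
  | cons x xs ih =>
    simp only [List.foldl]
    split_ifs with h
    · rw [ih]; simp
    · exact ih out

theorem pvB_scatter_get (s : List Char) (l : List Int) (out : List Char)
    (hlen : out.length = s.length) (i : Nat) (hi : i < s.length) :
    (l.foldl (fun (out : List Char) idx =>
      if 0 ≤ idx ∧ idx < (s.length : Int) then out.set idx.toNat (s.getD idx.toNat ' ') else out)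
      out).getD i '?' =
    if (i : Int) ∈ l then s.getD i ' ' else out.getD i '?' := by
  induction l generalizing out with
  | nil => simp
  | cons x xs ih =>
    simp only [List.foldl, List.mem_cons]
    by_cases hg : 0 ≤ x ∧ x < (s.length : Int)
    · rw [if_pos hg]
      rw [ih _ (by simp [hlen])]
      by_cases hmem : (i : Int) ∈ xs
      · simp [hmem]
      · rw [if_neg hmem]
        by_cases hx : (i : Int) = x
        · rw [if_pos (Or.inl hx)]
          have hxi : x.toNat = i := by omega
          rw [hxi, List.getD_eq_getElem?_getD,
            List.getElem?_set_self (by omega : i < out.length)]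
          rfl
        · rw [if_neg (by tauto)]
          rw [List.getD_eq_getElem?_getD, List.getD_eq_getElem?_getD,
            List.getElem?_set_ne (by omega), List.getD_eq_getElem?_getD]
    · rw [if_neg hg, ih _ hlen]
      have hx : (i : Int) ≠ x := by omega
      simp [hx]

theorem pvFlat_singleton (f : Nat → Char) (xs : List Nat) :
    xs.flatMap (fun i => [f i]) = xs.map f := by
  induction xs <;> simp_all

theorem random_word_eq (dico : String) (l : List Int) :
    random_word dico l = random_word_alt dico l := by
  unfold random_word random_word_alt
  set s := dico.toList with hs
  congr 1
  rw [pvA_foldl_map, List.nil_append]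
  have hsing : (fun i : Nat => if (i : Int) ∈ l then [s.getD i ' '] else ['-'])
      = (fun i : Nat => [if (i : Int) ∈ l then s.getD i ' ' else '-']) := by
    funext i; split_ifs <;> rfl
  rw [hsing, pvFlat_singleton]
  apply List.ext_getElem
  · rw [List.length_map, List.length_range, pvB_step_length, List.length_replicate]
  · intro i h1 h2
    have hi : i < s.length := by simpa using h1
    rw [List.getElem_map, List.getElem_range]
    have hget := pvB_scatter_get s l (List.replicate s.length '-') (by simp) i hi
    rw [List.getD_eq_getElem?_getD, List.getElem?_eq_getElem h2, Option.getD_some] at hget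
    rw [hget]
    split_ifs with hmem
    · rfl
    · simp [List.getD_eq_getElem?_getD, hi]

-- ===== VERDICT (by name: the statement is the Claim_ definition above) =====
theorem random_word_spec : Claim_equal_random_word := by
  intro dico l _
  exact random_word_eq dico l
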